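-- pv_equiv track=rewrite | github.com/YangLingSanShan/Code-Check | test_codes/test2/5.py | resolve_string
-- ===== SOURCE A (Python) =====
-- def resolve_string(s):
--     history = {0: 1}
--
--     MOD = 10**9 + 7
--     total = 0
--     offset = 0
--     for idx, char in enumerate(s):
--         offset = modify_offset(char, offset)
--         total = update_total(idx, s, history, offset, total, MOD)
--         history = update_history(idx, history, offset)
--
--     return total
--
-- def modify_offset(char, offset):
--     return offset - 1 if char == '1' else offset + 1
--
-- def update_total(idx, s, history, offset, total, MOD):
--     total += (len(s) - idx) * history.get(offset, 0)
--     total %= MOD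
--     return total
--
-- def update_history(idx, history, offset):
--     history[offset] = history.get(offset, 0) + idx + 2
--     return history
-- ===== SOURCE B (Python) =====
-- def resolve_string(s):
--     MOD = 10**9 + 7
--     n = len(s)
--     # prefix-balance array: p[k] = (#non-'1') - (#'1') among the first k chars
--     p = [0]
--     cur = 0
--     for ch in s:
--         cur = cur - 1 if ch == '1' else cur + 1
--         p.append(cur)
--     total = 0
--     for j in range(1, n + 1):
--         for i in range(j):
--             if p[i] == p[j]:
--                 total = (total + (i + 1) * (n - j + 1)) % MOD
--     return total
-- ===== Notes on version B (the rewrite author's own statement) =====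
-- stated objective: alternative
-- what changed: Replaced A's single pass with a running hash-map of per-balance weights by an explicit prefix-balance array and a direct double loop that sums (i+1)*(n-j+1) over all balanced index pairs i<j.
import Mathlib
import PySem

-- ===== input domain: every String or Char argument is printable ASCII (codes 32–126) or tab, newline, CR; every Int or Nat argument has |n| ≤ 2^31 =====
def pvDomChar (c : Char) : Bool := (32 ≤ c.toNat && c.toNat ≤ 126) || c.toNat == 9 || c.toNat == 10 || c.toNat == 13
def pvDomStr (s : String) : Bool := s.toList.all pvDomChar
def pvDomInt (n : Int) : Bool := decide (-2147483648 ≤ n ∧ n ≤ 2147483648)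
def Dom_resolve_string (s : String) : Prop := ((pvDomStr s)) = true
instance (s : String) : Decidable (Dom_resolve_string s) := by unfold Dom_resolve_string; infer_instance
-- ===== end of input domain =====

-- B replaces A's running hash-map of per-balance weights by a prefix-balance array plus a
-- direct double-loop summation over balanced index pairs (alternative decomposition, not faster).

-- ===== PORT A =====
def modify_offset (c : Char) (offset : Int) : Int :=
  if c = '1' then offset - 1 else offset + 1

def update_total (idx : Int) (s : String) (history : PySem.Dict Int Int)
    (offset total MOD : Int) : Int :=
  PySem.Int.mod (total + (PySem.Str.len s - idx) * history.getD offset 0) MOD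

def update_history (idx : Int) (history : PySem.Dict Int Int) (offset : Int) : PySem.Dict Int Int :=
  history.insert offset (history.getD offset 0 + idx + 2)

def resolve_string (s : String) : Int :=
  let MOD : Int := 10 ^ 9 + 7
  let st := (PySem.List.enumerate s.toList 0).foldl
    (fun (st : Int × Int × PySem.Dict Int Int) (p : Int × Char) =>
      let offset := modify_offset p.2 st.2.1
      let total := update_total p.1 s st.2.2 offset st.1 MOD
      let history := update_history p.1 st.2.2 offset
      (total, offset, history))
    (0, 0, PySem.Dict.ofList [(0, 1)])
  st.1

-- ===== PORT B =====
-- transliteration of Source B; p[i]/p[j] are always in range, ported as pyGetD (exact there)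
def resolve_string_alt (s : String) : Int :=
  let MOD : Int := 10 ^ 9 + 7
  let n : Int := PySem.Str.len s
  let pc := s.toList.foldl
    (fun (st : List Int × Int) (ch : Char) =>
      let cur := if ch = '1' then st.2 - 1 else st.2 + 1
      (st.1 ++ [cur], cur)) ([0], 0)
  let p := pc.1
  (PySem.List.pyRange 1 (n + 1) 1).foldl
    (fun total j =>
      (PySem.List.pyRange 0 j 1).foldl
        (fun total i =>
          if PySem.List.pyGetD p i 0 = PySem.List.pyGetD p j 0 then
            PySem.Int.mod (total + (i + 1) * (n - j + 1)) MOD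
          else total) total) 0

-- ===== PRECONDITION & SPEC =====
def Spec_resolve_string (s : String) (out : Int) : Prop := out = resolve_string_alt s
instance (s : String) (out : Int) : Decidable (Spec_resolve_string s out) := by unfold Spec_resolve_string; infer_instance

-- ===== CLAIM (what is proved, stated in full; the proofs are below) =====
def Claim_equal_resolve_string : Prop := ∀ (s : String), Dom_resolve_string s → Spec_resolve_string s (resolve_string s)

-- ===== LEMMAS AND PROOFS =====

-- balance of a char list, as A's offset accumulates it
def pvOff (cs : List Char) : Int := cs.foldl (fun o c => modify_offset c o) 0

-- prefix balance: p[k]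
def pvP (cs : List Char) (k : Nat) : Int := pvOff (cs.take k)

-- A's history value at key v after prefixes 0..k are recorded
def pvW (cs : List Char) (k : Nat) (v : Int) : Int :=
  ((List.range (k + 1)).map (fun i => if pvP cs i = v then (i : Int) + 1 else 0)).sum

-- contribution of right endpoint j (1 ≤ j)
def pvT (cs : List Char) (n j : Nat) : Int :=
  ((List.range j).map (fun i =>
    if pvP cs i = pvP cs j then ((i : Int) + 1) * ((n : Int) - (j : Int) + 1) else 0)).sum

-- total sum after right endpoints 1..k
def pvS (cs : List Char) (n k : Nat) : Int :=
  ((List.range k).map (fun j => pvT cs n (j + 1))).sum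

-- basic facts about the balance prefixes

lemma pvOff_append (xs : List Char) (c : Char) :
    pvOff (xs ++ [c]) = modify_offset c (pvOff xs) := by
  simp [pvOff, List.foldl_append]

lemma pvP_zero (cs : List Char) : pvP cs 0 = 0 := rfl

lemma pvP_succ (cs : List Char) (k : Nat) (hk : k < cs.length) :
    pvP cs (k + 1) = modify_offset cs[k] (pvP cs k) := by
  have h : cs.take (k + 1) = cs.take k ++ [cs[k]] := by
    rw [List.take_add_one, List.getElem?_eq_getElem hk]
    rfl
  unfold pvP
  rw [h, pvOff_append]

lemma pvW_zero (cs : List Char) (v : Int) :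
    pvW cs 0 v = if pvP cs 0 = v then 1 else 0 := by
  simp [pvW]

lemma pvW_succ (cs : List Char) (k : Nat) (v : Int) :
    pvW cs (k + 1) v = pvW cs k v + (if pvP cs (k + 1) = v then (k : Int) + 2 else 0) := by
  unfold pvW
  rw [List.range_succ, List.map_append, List.sum_append]
  simp only [List.map_cons, List.map_nil, List.sum_cons, List.sum_nil, add_zero]
  split_ifs <;> push_cast <;> ring

lemma pvS_succ (cs : List Char) (n k : Nat) :
    pvS cs n (k + 1) = pvS cs n k + pvT cs n (k + 1) := by
  unfold pvS
  rw [List.range_succ, List.map_append, List.sum_append]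
  simp

lemma pvT_eq (cs : List Char) (n k : Nat) :
    ((n : Int) - (k : Int)) * pvW cs k (pvP cs (k + 1)) = pvT cs n (k + 1) := by
  unfold pvW pvT
  rw [← List.sum_map_mul_left]
  refine congrArg List.sum (List.map_congr_left ?_)
  intro i _
  split_ifs <;> push_cast <;> ring

-- A's loop invariant
lemma pvA_loop (s : String) (cs : List Char) (hcs : s.toList = cs) :
    ∀ (rest : List Char) (k : Nat) (H : PySem.Dict Int Int),
      cs.drop k = rest → k ≤ cs.length →
      (∀ v, H.getD v 0 = pvW cs k v) →
      ((PySem.List.enumerate rest (k : Int)).foldl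
        (fun (st : Int × Int × PySem.Dict Int Int) (p : Int × Char) =>
          let offset := modify_offset p.2 st.2.1
          let total := update_total p.1 s st.2.2 offset st.1 (10 ^ 9 + 7)
          let history := update_history p.1 st.2.2 offset
          (total, offset, history))
        (pvS cs cs.length k % (10 ^ 9 + 7), pvP cs k, H)).1
        = pvS cs cs.length cs.length % (10 ^ 9 + 7) := by
  intro rest
  induction rest with
  | nil =>
    intro k H hdrop hk _
    have : cs.length ≤ k := by
      have := congrArg List.length hdrop
      simp at this
      omega
    have hkl : k = cs.length := le_antisymm hk this
    simp [hkl]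
  | cons c rest' ih =>
    intro k H hdrop hk hH
    have hklt : k < cs.length := by
      by_contra h
      rw [List.drop_eq_nil_of_le (by omega)] at hdrop
      simp at hdrop
    have hck : cs[k] = c := by
      have h0 : (cs.drop k)[0]'(by rw [hdrop]; simp) = c := by
        simp [hdrop]
      rwa [List.getElem_drop] at h0
    have hdrop' : cs.drop (k + 1) = rest' := by
      have : cs.drop (k + 1) = (cs.drop k).drop 1 := by
        rw [List.drop_drop]
      rw [this, hdrop]
      simp
    rw [PySem.List.enumerate_cons, List.foldl_cons]
    have hoff : modify_offset c (pvP cs k) = pvP cs (k + 1) := by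
      rw [pvP_succ cs k hklt, hck]
    have hMpos : (0 : Int) < 10 ^ 9 + 7 := by norm_num
    have htot :
        update_total (k : Int) s H (modify_offset c (pvP cs k))
          (pvS cs cs.length k % (10 ^ 9 + 7)) (10 ^ 9 + 7)
        = pvS cs cs.length (k + 1) % (10 ^ 9 + 7) := by
      unfold update_total
      rw [PySem.Int.mod_eq_emod_of_pos hMpos, hoff, hH, PySem.Str.len_eq, hcs]
      rw [Int.emod_add_emod, pvT_eq cs cs.length k, ← pvS_succ]
    have hhist : ∀ v,
        (update_history (k : Int) H (modify_offset c (pvP cs k))).getD v 0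
          = pvW cs (k + 1) v := by
      intro v
      unfold update_history
      rw [hoff, PySem.Dict.getD_insert, hH, pvW_succ]
      split_ifs with h1 h2 h3
      · rw [h1]; ring
      · exact absurd h1.symm h2
      · exact absurd h3.symm h1
      · simp [hH]
    have := ih (k + 1) (update_history (k : Int) H (modify_offset c (pvP cs k)))
      hdrop' (by omega) hhist
    simp only at this ⊢
    rw [htot]
    rw [hoff] at this ⊢
    have hcast : ((k : Int) + 1) = ((k + 1 : Nat) : Int) := by push_cast; ring
    rw [hcast]
    exact this

-- A equals the common sum mod M
lemma pvA_eq (s : String) :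
    resolve_string s = pvS s.toList s.toList.length s.toList.length % (10 ^ 9 + 7) := by
  unfold resolve_string
  simp only []
  have h0 : (PySem.Dict.ofList [((0 : Int), (1 : Int))]) = (PySem.Dict.empty).insert 0 1 := rfl
  have hH : ∀ v, (PySem.Dict.ofList [((0 : Int), (1 : Int))]).getD v 0 = pvW s.toList 0 v := by
    intro v
    rw [h0, PySem.Dict.getD_insert, pvW_zero, pvP_zero]
    split_ifs with h1 h2 h3
    · rfl
    · exact absurd h1.symm h2
    · exact absurd h3.symm h1
    · simp [PySem.Dict.getD_empty]
  have := pvA_loop s s.toList rfl s.toList 0 (PySem.Dict.ofList [((0 : Int), (1 : Int))])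
    (by simp) (by omega) hH
  simpa [pvS, pvP] using this

-- B's prefix-array construction, characterised
lemma pvB_build (cs : List Char) : ∀ (pre : List Char) (acc : List Int),
    cs.foldl (fun (st : List Int × Int) (ch : Char) =>
        let cur := if ch = '1' then st.2 - 1 else st.2 + 1
        (st.1 ++ [cur], cur)) (acc, pvOff pre)
    = (acc ++ (List.range cs.length).map (fun k => pvOff (pre ++ cs.take (k + 1))), pvOff (pre ++ cs)) := by
  induction cs with
  | nil => intro pre acc; simp
  | cons c cs' ih =>
    intro pre acc
    rw [List.foldl_cons]
    simp only []
    have hcur : (if c = '1' then pvOff pre - 1 else pvOff pre + 1) = pvOff (pre ++ [c]) := by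
      rw [pvOff_append]; rfl
    rw [hcur, ih (pre ++ [c]) (acc ++ [pvOff (pre ++ [c])])]
    simp [List.range_succ_eq_map, List.map_map, Function.comp, List.append_assoc]

lemma pvB_p (cs : List Char) :
    (cs.foldl (fun (st : List Int × Int) (ch : Char) =>
        let cur := if ch = '1' then st.2 - 1 else st.2 + 1
        (st.1 ++ [cur], cur)) ([0], 0)).1
    = (List.range (cs.length + 1)).map (fun k => pvP cs k) := by
  rw [show (([(0:Int)], (0:Int)) : List Int × Int) = ([0], pvOff []) from by simp [pvOff],
    pvB_build cs [] [0]]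
  simp [pvP, pvOff, List.range_succ_eq_map, List.map_map, Function.comp]

lemma pvB_get (cs : List Char) (i : Int) (h0 : 0 ≤ i) (h1 : i < (cs.length : Int) + 1) :
    PySem.List.pyGetD ((List.range (cs.length + 1)).map (fun k => pvP cs k)) i 0 = pvP cs i.toNat := by
  rw [PySem.List.pyGetD_eq_getElem _ _ h0 (by simp; omega)]
  simp

lemma pvB_inner (cs : List Char) (j : Nat) (hj : j ≤ cs.length) :
    ∀ (m : Nat), m ≤ j → ∀ (T : Int),
    (PySem.List.pyRange 0 (m : Int) 1).foldl
      (fun total i =>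
        if PySem.List.pyGetD ((List.range (cs.length + 1)).map (fun k => pvP cs k)) i 0
            = PySem.List.pyGetD ((List.range (cs.length + 1)).map (fun k => pvP cs k)) (j : Int) 0 then
          PySem.Int.mod (total + (i + 1) * ((cs.length : Int) - (j : Int) + 1)) (10 ^ 9 + 7)
        else total) (T % (10 ^ 9 + 7))
    = (T + ((List.range m).map (fun i =>
        if pvP cs i = pvP cs j then ((i : Int) + 1) * ((cs.length : Int) - (j : Int) + 1) else 0)).sum)
        % (10 ^ 9 + 7) := by
  intro m
  induction m with
  | zero =>
    intro _ T
    rw [PySem.List.pyRange_one_eq_nil (by norm_num)]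
    simp
  | succ m ih =>
    intro hm T
    have hcast : ((m + 1 : Nat) : Int) = (m : Int) + 1 := by push_cast; ring
    rw [hcast, PySem.List.pyRange_one_succ_right (Int.natCast_nonneg m),
      List.foldl_append, ih (by omega)]
    simp only [List.foldl_cons, List.foldl_nil]
    rw [pvB_get cs (m : Int) (Int.natCast_nonneg m) (by omega),
      pvB_get cs (j : Int) (Int.natCast_nonneg j) (by omega),
      Int.toNat_natCast, Int.toNat_natCast]
    rw [List.range_succ, List.map_append, List.sum_append]
    simp only [List.map_cons, List.map_nil, List.sum_cons, List.sum_nil, add_zero]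
    split_ifs with h
    · rw [PySem.Int.mod_eq_emod_of_pos (by norm_num), Int.emod_add_emod, add_assoc]
    · simp

lemma pvB_outer (cs : List Char) :
    ∀ (k : Nat), k ≤ cs.length →
    (PySem.List.pyRange 1 ((k : Int) + 1) 1).foldl
      (fun total j =>
        (PySem.List.pyRange 0 j 1).foldl
          (fun total i =>
            if PySem.List.pyGetD ((List.range (cs.length + 1)).map (fun k => pvP cs k)) i 0
                = PySem.List.pyGetD ((List.range (cs.length + 1)).map (fun k => pvP cs k)) j 0 then
              PySem.Int.mod (total + (i + 1) * ((cs.length : Int) - j + 1)) (10 ^ 9 + 7)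
            else total) total) 0
    = pvS cs cs.length k % (10 ^ 9 + 7) := by
  intro k
  induction k with
  | zero =>
    intro _
    rw [PySem.List.pyRange_one_eq_nil (by norm_num)]
    simp [pvS]
  | succ k ih =>
    intro hk
    have hcast : ((k + 1 : Nat) : Int) = (k : Int) + 1 := by push_cast; ring
    rw [show ((k + 1 : Nat) : Int) + 1 = ((k : Int) + 1) + 1 from by push_cast; ring,
      PySem.List.pyRange_one_succ_right (by omega), List.foldl_append, ih (by omega)]
    simp only [List.foldl_cons, List.foldl_nil]
    rw [show ((k : Int) + 1) = ((k + 1 : Nat) : Int) from by push_cast; ring]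
    rw [pvB_inner cs (k + 1) (by omega) (k + 1) le_rfl (pvS cs cs.length k)]
    rw [pvS_succ]
    rfl

lemma pvB_eq (s : String) :
    resolve_string_alt s = pvS s.toList s.toList.length s.toList.length % (10 ^ 9 + 7) := by
  unfold resolve_string_alt
  simp only [PySem.Str.len_eq]
  rw [pvB_p]
  have := pvB_outer s.toList s.toList.length le_rfl
  exact this

theorem resolve_string_spec : Claim_equal_resolve_string := by
  intro s _
  unfold Spec_resolve_string
  rw [pvA_eq, pvB_eq]
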